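-- pv_equiv track=rewrite | github.com/srillaert/project-euler | p050.py | aggregate_consecutive_primes
-- ===== SOURCE A (Python) =====
-- def get_next_prime(n, is_prime_array):
-- 	result = n + 1
-- 	while not is_prime_array[result]:
-- 		result += 1
-- 	return result
--
-- def get_consecutive_primes(prime, is_prime_array):
-- 	while True:
-- 		yield prime
-- 		prime = get_next_prime(prime, is_prime_array)
--
-- def aggregate_consecutive_primes(start_prime, is_prime_array, till_sum):
-- 	sum = 0
-- 	count = 0
-- 	for prime in get_consecutive_primes(start_prime, is_prime_array):
-- 		sum += prime
-- 		count += 1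
-- 		if sum >= till_sum:
-- 			break
-- 		yield count, sum
-- ===== SOURCE B (Python) =====
-- def aggregate_consecutive_primes(start_prime, is_prime_array, till_sum):
-- 	if start_prime >= till_sum:
-- 		return
-- 	primes = [start_prime] + [i for i in range(start_prime + 1, len(is_prime_array)) if is_prime_array[i]]
-- 	total = 0
-- 	count = 0
-- 	for p in primes:
-- 		total += p
-- 		count += 1
-- 		if total >= till_sum:
-- 			return
-- 		yield count, total
-- ===== Notes on version B (the rewrite author's own statement) =====
-- stated objective: simpler
-- what changed: Replaces A's nested generator helpers (get_next_prime scan inside an infinite get_consecutive_primes generator) by two plain phases: materialize the candidate-prime list with one comprehension, then a single enumerate-style accumulation loop with early return.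
import Mathlib
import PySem

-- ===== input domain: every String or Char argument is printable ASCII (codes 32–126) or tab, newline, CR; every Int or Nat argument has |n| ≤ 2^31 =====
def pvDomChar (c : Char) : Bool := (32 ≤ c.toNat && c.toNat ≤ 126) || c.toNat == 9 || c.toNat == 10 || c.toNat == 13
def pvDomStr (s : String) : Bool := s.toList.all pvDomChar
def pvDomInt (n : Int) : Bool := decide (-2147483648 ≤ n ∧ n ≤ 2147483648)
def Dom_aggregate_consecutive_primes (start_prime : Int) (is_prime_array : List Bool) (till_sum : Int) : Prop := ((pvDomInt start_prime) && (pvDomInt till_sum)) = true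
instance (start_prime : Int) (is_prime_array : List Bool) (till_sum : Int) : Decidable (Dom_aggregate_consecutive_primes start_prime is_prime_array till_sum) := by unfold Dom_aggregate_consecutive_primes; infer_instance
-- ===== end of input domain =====

-- B collapses A's nested generator helpers into two plain phases (one comprehension building the
-- prime list, then one accumulation loop); equivalence of the yielded pairs is proved on Pre_.

-- ===== PORT A =====
-- get_next_prime: scan upward from n+1 until a truthy entry; none = IndexError (fuel-bounded,
-- the fuel chosen at the call sites provably suffices on Pre_).
def pvGetNextPrime (arr : List Bool) : Int → Nat → Option Int
  | _, 0 => none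
  | result, f+1 =>
    match PySem.List.pyGet? arr result with
    | none => none                 -- IndexError in Python
    | some true => some result
    | some false => pvGetNextPrime arr (result+1) f

-- the for-loop over get_consecutive_primes: add prime, bump count, break or yield, get next prime
def pvALoop (arr : List Bool) (till : Int) : Int → Int → Int → Nat → List (Int × Int)
  | _, _, _, 0 => []
  | prime, sum, count, f+1 =>
    let sum' := sum + prime
    let count' := count + 1
    if till ≤ sum' then []
    else
      match pvGetNextPrime arr (prime+1) (arr.length + (prime+1).natAbs + 1) with
      | none => []                 -- IndexError in Python (outside Pre_)
      | some p => (count', sum') :: pvALoop arr till p sum' count' f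

def aggregate_consecutive_primes (start_prime : Int) (is_prime_array : List Bool) (till_sum : Int) : List (Int × Int) :=
  pvALoop is_prime_array till_sum start_prime 0 0 (is_prime_array.length + start_prime.natAbs + 2)

-- ===== PORT B =====
-- B's comprehension: [i for i in range(j, len(arr)) if arr[i]]
def pvPrimes (arr : List Bool) (j : Int) : List Int :=
  (PySem.List.pyRange j (arr.length : Int) 1).filter (fun i => (PySem.List.pyGet? arr i).getD false)

-- B's accumulation loop over the materialized prime list
def pvAltLoop (till : Int) : List Int → Int → Int → List (Int × Int)
  | [], _, _ => []
  | p :: rest, total, count =>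
    let t := total + p
    let c := count + 1
    if till ≤ t then [] else (c, t) :: pvAltLoop till rest t c

def aggregate_consecutive_primes_alt (start_prime : Int) (is_prime_array : List Bool) (till_sum : Int) : List (Int × Int) :=
  if till_sum ≤ start_prime then []
  else pvAltLoop till_sum (start_prime :: pvPrimes is_prime_array (start_prime + 1)) 0 0

-- ===== PRECONDITION & SPEC =====
-- Pre_ = exactly the inputs where A's generator terminates without IndexError: either the very
-- first (unchecked) prime already reaches till_sum, or the scan starts at a valid index and the
-- truthy indices after start_prime suffice to reach till_sum before the scan runs off the end.
def Pre_aggregate_consecutive_primes (start_prime : Int) (is_prime_array : List Bool) (till_sum : Int) : Prop :=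
  till_sum ≤ start_prime ∨
    (-(is_prime_array.length : Int) ≤ start_prime + 1 ∧
      till_sum ≤ start_prime + (pvPrimes is_prime_array (start_prime + 1)).sum)
instance (start_prime : Int) (is_prime_array : List Bool) (till_sum : Int) : Decidable (Pre_aggregate_consecutive_primes start_prime is_prime_array till_sum) := by unfold Pre_aggregate_consecutive_primes; infer_instance

def pvWitness_aggregate_consecutive_primes : Int × List Bool × Int := (2, [false, false, false, true, false], 5)

def Spec_aggregate_consecutive_primes (start_prime : Int) (is_prime_array : List Bool) (till_sum : Int) (out : List (Int × Int)) : Prop := out = aggregate_consecutive_primes_alt start_prime is_prime_array till_sum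
instance (start_prime : Int) (is_prime_array : List Bool) (till_sum : Int) (out : List (Int × Int)) : Decidable (Spec_aggregate_consecutive_primes start_prime is_prime_array till_sum out) := by unfold Spec_aggregate_consecutive_primes; infer_instance

-- ===== CLAIM (what is proved, stated in full; the proofs are below) =====
def Claim_equal_aggregate_consecutive_primes : Prop := ∀ (start_prime : Int) (is_prime_array : List Bool) (till_sum : Int), Dom_aggregate_consecutive_primes start_prime is_prime_array till_sum → Pre_aggregate_consecutive_primes start_prime is_prime_array till_sum → Spec_aggregate_consecutive_primes start_prime is_prime_array till_sum (aggregate_consecutive_primes start_prime is_prime_array till_sum)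


-- ===== LEMMAS AND PROOFS =====

-- the helper scan equals "first element of B's filtered range", given valid start and enough fuel
lemma pvGetNextPrime_eq (arr : List Bool) : ∀ (fuel : Nat) (j : Int),
    -(arr.length : Int) ≤ j → ((arr.length : Int) - j).toNat < fuel →
    pvGetNextPrime arr j fuel = (pvPrimes arr j).head? := by
  intro fuel
  induction fuel with
  | zero => intro j _ hf; omega
  | succ f ih =>
    intro j hj hf
    by_cases hlt : j < (arr.length : Int)
    · have hb : ∃ b, PySem.List.pyGet? arr j = some b := by
        cases h : PySem.List.pyGet? arr j with
        | none =>
          rw [PySem.List.pyGet?_eq_none_iff] at h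
          exact absurd ⟨hj, hlt⟩ h
        | some b => exact ⟨b, rfl⟩
      obtain ⟨b, hb⟩ := hb
      have hP : pvPrimes arr j =
          (if (PySem.List.pyGet? arr j).getD false then
            j :: (PySem.List.pyRange (j+1) (arr.length : Int) 1).filter
              (fun i => (PySem.List.pyGet? arr i).getD false)
          else pvPrimes arr (j+1)) := by
        unfold pvPrimes
        rw [PySem.List.pyRange_one_cons hlt, List.filter_cons]
      cases b with
      | true =>
        simp only [pvGetNextPrime, hb]
        rw [hP]
        simp [hb]
      | false =>
        simp only [pvGetNextPrime, hb]
        rw [hP]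
        simp only [hb, Option.getD_some, if_neg Bool.false_ne_true]
        exact ih (j+1) (by omega) (by omega)
    · have hnone : PySem.List.pyGet? arr j = none := by
        rw [PySem.List.pyGet?_eq_none_iff]
        intro ⟨_, h2⟩; omega
      simp only [pvGetNextPrime, hnone]
      unfold pvPrimes
      rw [PySem.List.pyRange_one_eq_nil (by omega)]
      rfl

-- decomposing B's prime list: the head is ≥ the scan start and the tail restarts after it
lemma pvPrimes_cons (arr : List Bool) : ∀ (n : Nat) (j p : Int) (tail : List Int),
    ((arr.length : Int) - j).toNat ≤ n → pvPrimes arr j = p :: tail →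
    j ≤ p ∧ tail = pvPrimes arr (p+1) := by
  intro n
  induction n with
  | zero =>
    intro j p tail hn h
    unfold pvPrimes at h
    rw [PySem.List.pyRange_one_eq_nil (by omega)] at h
    simp at h
  | succ n ih =>
    intro j p tail hn h
    by_cases hlt : j < (arr.length : Int)
    · unfold pvPrimes at h
      rw [PySem.List.pyRange_one_cons hlt, List.filter_cons] at h
      by_cases hb : ((PySem.List.pyGet? arr j).getD false) = true
      · rw [if_pos hb] at h
        obtain ⟨h1, h2⟩ := List.cons.inj h
        subst h1
        exact ⟨le_refl _, by rw [← h2]; rfl⟩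
      · rw [if_neg hb] at h
        have := ih (j+1) p tail (by omega) h
        exact ⟨by omega, this.2⟩
    · unfold pvPrimes at h
      rw [PySem.List.pyRange_one_eq_nil (by omega)] at h
      simp at h

-- main invariant: A's loop equals B's loop on "current prime :: remaining primes", provided the
-- remaining primes suffice to reach till (so A never hits the IndexError / fuel bound)
lemma pvLoop_eq (arr : List Bool) (till : Int) : ∀ (fuel : Nat) (prime sum count : Int),
    -(arr.length : Int) ≤ prime + 1 →
    till ≤ sum + prime + (pvPrimes arr (prime+1)).sum →
    (pvPrimes arr (prime+1)).length < fuel →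
    pvALoop arr till prime sum count fuel =
      pvAltLoop till (prime :: pvPrimes arr (prime+1)) sum count := by
  intro fuel
  induction fuel with
  | zero => intro prime sum count _ _ hf; omega
  | succ f ih =>
    intro prime sum count hvalid hsum hf
    simp only [pvALoop, pvAltLoop]
    by_cases hstop : till ≤ sum + prime
    · rw [if_pos hstop, if_pos hstop]
    · rw [if_neg hstop, if_neg hstop]
      have hgnp : pvGetNextPrime arr (prime+1) (arr.length + (prime+1).natAbs + 1) =
          (pvPrimes arr (prime+1)).head? :=
        pvGetNextPrime_eq arr _ (prime+1) hvalid (by omega)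
      cases hrest : pvPrimes arr (prime+1) with
      | nil =>
        exfalso
        rw [hrest] at hsum
        simp at hsum
        omega
      | cons p tail =>
        rw [hrest] at hgnp
        simp only [List.head?] at hgnp
        rw [hgnp]
        show (count + 1, sum + prime) :: pvALoop arr till p (sum + prime) (count + 1) f =
          (count + 1, sum + prime) :: pvAltLoop till (p :: tail) (sum + prime) (count + 1)
        have hdec := pvPrimes_cons arr ((arr.length : Int) - (prime+1)).toNat
          (prime+1) p tail (le_refl _) hrest
        obtain ⟨hle, htail⟩ := hdec
        have hsum' : till ≤ (sum + prime) + p + (pvPrimes arr (p+1)).sum := by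
          rw [hrest] at hsum
          simp only [List.sum_cons] at hsum
          rw [← htail]; omega
        have hlen : (pvPrimes arr (p+1)).length < f := by
          rw [hrest] at hf
          rw [← htail]
          simp at hf; omega
        rw [htail, ih p (sum + prime) (count + 1) (by omega) hsum' hlen]

-- A's loop with one unit of fuel left but the break condition met returns [] at once
lemma pvALoop_stop (arr : List Bool) (till : Int) (prime sum count : Int) (f : Nat)
    (h : till ≤ sum + prime) : pvALoop arr till prime sum count (f+1) = [] := by
  simp only [pvALoop]
  rw [if_pos h]

-- ===== VERDICT (by name: the statement is the Claim_ definition above) =====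
theorem aggregate_consecutive_primes_spec : Claim_equal_aggregate_consecutive_primes := by
  unfold Claim_equal_aggregate_consecutive_primes
  intro s arr till _ hpre
  unfold Spec_aggregate_consecutive_primes aggregate_consecutive_primes aggregate_consecutive_primes_alt
  by_cases hs : till ≤ s
  · rw [if_pos hs]
    exact pvALoop_stop arr till s 0 0 _ (by omega)
  · rw [if_neg hs]
    rcases hpre with h | ⟨hvalid, hsum⟩
    · omega
    · have hlen : (pvPrimes arr (s+1)).length < arr.length + s.natAbs + 2 := by
        have h1 : (pvPrimes arr (s+1)).length ≤
            (PySem.List.pyRange (s+1) (arr.length : Int) 1).length :=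
          List.length_filter_le _ _
        rw [PySem.List.length_pyRange_one] at h1
        omega
      exact pvLoop_eq arr till _ s 0 0 hvalid (by omega) hlen
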